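-- pv_equiv track=rewrite | github.com/shawinsoranakom/CodeSnippets | CollectedSnippets/TrainingDataset/Snip0141.py | get_index_of_rightmost_set_bit
-- ===== SOURCE A (Python) =====
-- def get_index_of_rightmost_set_bit(number: int) -> int:
--
--     if not isinstance(number, int) or number < 0:
--         raise ValueError("Input must be a non-negative integer")
--
--     intermediate = number & ~(number - 1)
--     index = 0
--     while intermediate:
--         intermediate >>= 1
--         index += 1
--     return index - 1
-- ===== SOURCE B (Python) =====
-- def get_index_of_rightmost_set_bit(number: int) -> int:
--     if not isinstance(number, int) or number < 0:
--         raise ValueError("Input must be a non-negative integer")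
--     return (number & -number).bit_length() - 1
-- ===== Notes on version B (the rewrite author's own statement) =====
-- stated objective: simpler
-- what changed: Replaces the shift-and-count while loop with the closed form (number & -number).bit_length() - 1.
import Mathlib
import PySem

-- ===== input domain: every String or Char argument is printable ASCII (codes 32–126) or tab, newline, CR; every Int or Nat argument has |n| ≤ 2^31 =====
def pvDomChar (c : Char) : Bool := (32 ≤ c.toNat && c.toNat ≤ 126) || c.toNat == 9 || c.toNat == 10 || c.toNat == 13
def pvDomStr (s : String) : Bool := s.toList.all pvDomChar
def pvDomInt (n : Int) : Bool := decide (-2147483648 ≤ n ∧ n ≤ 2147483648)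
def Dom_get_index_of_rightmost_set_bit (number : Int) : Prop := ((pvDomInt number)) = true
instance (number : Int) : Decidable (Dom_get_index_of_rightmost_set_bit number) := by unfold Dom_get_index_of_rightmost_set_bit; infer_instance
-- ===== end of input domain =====

-- B replaces A's shift-and-count loop with the closed form (number & -number).bit_length() - 1.
-- Both raise ValueError on negative input; Pre_ excludes exactly those inputs.

-- ===== PORT A =====
-- the while loop: shift right and count until intermediate is 0.  Guard '0 < intermediate'
-- is the totality guard: inside Pre_ (number ≥ 0) intermediate is always ≥ 0, so it is
-- Python's nonzero truthiness test there.
def pvLoopA (intermediate index : Int) : Int :=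
  if 0 < intermediate then pvLoopA (intermediate >>> (1 : Nat)) (index + 1) else index
termination_by intermediate.toNat
decreasing_by
  rename_i h
  simp only [Int.shiftRight_eq_div_pow, pow_one]
  omega

def get_index_of_rightmost_set_bit (number : Int) : Int :=
  pvLoopA (PySem.Int.band number (Int.not (number - 1))) 0 - 1

-- ===== PORT B =====
def get_index_of_rightmost_set_bit_alt (number : Int) : Int :=
  (PySem.Int.bitLength (PySem.Int.band number (-number)) : Int) - 1

-- ===== PRECONDITION & SPEC =====
-- Pre_ excludes exactly the inputs on which A raises ValueError (negative numbers).
def Pre_get_index_of_rightmost_set_bit (number : Int) : Prop := 0 ≤ number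
instance (number : Int) : Decidable (Pre_get_index_of_rightmost_set_bit number) := by unfold Pre_get_index_of_rightmost_set_bit; infer_instance
def pvWitness_get_index_of_rightmost_set_bit : Int := 12
def Spec_get_index_of_rightmost_set_bit (number : Int) (out : Int) : Prop := out = get_index_of_rightmost_set_bit_alt number
instance (number : Int) (out : Int) : Decidable (Spec_get_index_of_rightmost_set_bit number out) := by unfold Spec_get_index_of_rightmost_set_bit; infer_instance

-- ===== CLAIM (what is proved, stated in full; the proofs are below) =====
def Claim_equal_get_index_of_rightmost_set_bit : Prop := ∀ (number : Int), Dom_get_index_of_rightmost_set_bit number → Pre_get_index_of_rightmost_set_bit number → Spec_get_index_of_rightmost_set_bit number (get_index_of_rightmost_set_bit number)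

-- ===== LEMMAS AND PROOFS =====

-- The loop, started on a nonnegative value, adds its bit length to the index.
theorem pvLoopA_natCast (n : Nat) : ∀ idx : Int, pvLoopA (n : Int) idx = idx + (PySem.Int.bitLength (n : Int) : Int) := by
  induction n using Nat.strong_induction_on with
  | _ n ih =>
    intro idx
    rw [pvLoopA]
    by_cases h : 0 < n
    · have hs : ((n : Int) >>> (1 : Nat)) = ((n / 2 : Nat) : Int) := by
        simp only [Int.shiftRight_eq_div_pow, pow_one]
        omega
      rw [if_pos (by exact_mod_cast h), hs, ih (n / 2) (by omega),
        PySem.Int.bitLength_natCast h]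
      push_cast
      omega
    · have h0 : n = 0 := by omega
      subst h0
      simp [PySem.Int.bitLength_zero]

theorem not_sub_one (number : Int) : Int.not (number - 1) = -number := by
  cases h : number - 1 with
  | ofNat k =>
    show Int.negSucc k = -number
    rw [Int.negSucc_eq]
    simp only [Int.ofNat_eq_natCast] at h
    omega
  | negSucc k =>
    show (Int.ofNat k) = -number
    rw [Int.negSucc_eq] at h
    simp only [Int.ofNat_eq_natCast]
    omega

-- ===== VERDICT (by name: the statement is the Claim_ definition above) =====
theorem get_index_of_rightmost_set_bit_spec : Claim_equal_get_index_of_rightmost_set_bit := by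
  intro number _ hpre
  have hb : 0 ≤ PySem.Int.band number (-number) :=
    PySem.Int.band_nonneg_of_nonneg_left _ hpre
  unfold Spec_get_index_of_rightmost_set_bit get_index_of_rightmost_set_bit get_index_of_rightmost_set_bit_alt
  rw [not_sub_one]
  have := pvLoopA_natCast (PySem.Int.band number (-number)).toNat 0
  rw [Int.toNat_of_nonneg hb] at this
  rw [this]
  ring
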